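-- pv_equiv track=rewrite | github.com/jrubcor/python | course1/project5.py | reducir_lista
-- ===== SOURCE A (Python) =====
-- def reducir_lista(lista):
--     lista_duplicate = []
--     for index, n in enumerate(lista):
--         if n not in lista_duplicate:
--             lista_duplicate.append(n)
--         else:
--             pass
--     lista = sorted(lista_duplicate)
--     lista.pop()
--     return lista
-- ===== SOURCE B (Python) =====
-- def reducir_lista(lista):
--     ordenada = sorted(lista)
--     unicos = []
--     for x in ordenada:
--         if not unicos or unicos[-1] != x:
--             unicos.append(x)
--     unicos.pop()
--     return unicos
-- ===== Notes on version B (the rewrite author's own statement) =====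
-- stated objective: faster
-- what changed: Sort first, then deduplicate adjacent equal elements in one pass over the sorted list, instead of a quadratic membership-test dedup followed by a sort; the final pop() is kept so the empty-list IndexError is unchanged.
import Mathlib
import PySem

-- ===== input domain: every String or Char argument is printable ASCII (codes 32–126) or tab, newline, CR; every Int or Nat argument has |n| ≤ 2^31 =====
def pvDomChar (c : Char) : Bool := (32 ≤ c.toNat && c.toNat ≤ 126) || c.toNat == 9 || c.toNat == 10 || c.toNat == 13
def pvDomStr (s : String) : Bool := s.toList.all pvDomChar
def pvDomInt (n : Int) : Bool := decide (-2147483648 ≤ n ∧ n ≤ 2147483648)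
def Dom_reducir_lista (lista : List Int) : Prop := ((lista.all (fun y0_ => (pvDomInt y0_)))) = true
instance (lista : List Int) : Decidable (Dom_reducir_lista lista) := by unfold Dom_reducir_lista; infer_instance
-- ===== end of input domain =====

-- B sorts first and removes duplicates by one adjacent-equality pass (O(n log n))
-- instead of A's quadratic membership-test dedup followed by a sort; the final
-- pop is kept, so both raise IndexError on the empty list (excluded by Pre_).

-- ===== PORT A =====
-- for index, n in enumerate(lista): if n not in lista_duplicate: append
def reducir_lista (lista : List Int) : List Int :=
  let lista_duplicate :=
    (PySem.List.enumerate lista 0).foldl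
      (fun acc p => if p.2 ∈ acc then acc else acc ++ [p.2]) []
  let lista' := PySem.List.sorted lista_duplicate (fun x => x) false
  -- lista.pop(): raises IndexError on []; Pre_ excludes that, total form drops last
  lista'.dropLast

-- ===== PORT B =====
def reducir_lista_alt (lista : List Int) : List Int :=
  let ordenada := PySem.List.sorted lista (fun x => x) false
  let unicos :=
    ordenada.foldl
      (fun acc x => if acc.getLast? = some x then acc else acc ++ [x]) []
  -- unicos.pop(): raises IndexError on []; Pre_ excludes that, total form drops last
  unicos.dropLast

-- ===== PRECONDITION & SPEC =====
-- Pre_ excludes only the empty list, on which A's .pop() raises IndexError.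
def Pre_reducir_lista (lista : List Int) : Prop := lista ≠ []
instance (lista : List Int) : Decidable (Pre_reducir_lista lista) := by unfold Pre_reducir_lista; infer_instance
def pvWitness_reducir_lista : List Int := [3, 1, 3, 2]

def Spec_reducir_lista (lista : List Int) (out : List Int) : Prop := out = reducir_lista_alt lista
instance (lista : List Int) (out : List Int) : Decidable (Spec_reducir_lista lista out) := by unfold Spec_reducir_lista; infer_instance

-- ===== CLAIM (what is proved, stated in full; the proofs are below) =====
def Claim_equal_reducir_lista : Prop := ∀ (lista : List Int), Dom_reducir_lista lista → Pre_reducir_lista lista → Spec_reducir_lista lista (reducir_lista lista)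

-- ===== LEMMAS AND PROOFS =====

-- helper naming B's adjacency-dedup recursion (proof-only)
def pvAdj : List Int → Option Int → List Int
  | [], _ => []
  | x :: xs, p => if p = some x then pvAdj xs p else x :: pvAdj xs (some x)

-- B's foldl over any accumulator is acc ++ pvAdj of the rest, keyed by acc's last element
theorem pvAdj_foldl (xs : List Int) : ∀ (acc : List Int),
    xs.foldl (fun acc x => if acc.getLast? = some x then acc else acc ++ [x]) acc
      = acc ++ pvAdj xs acc.getLast? := by
  induction xs with
  | nil => intro acc; simp [pvAdj]
  | cons x xs ih =>
    intro acc
    by_cases h : acc.getLast? = some x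
    · rw [List.foldl_cons, if_pos h, ih acc]
      rw [pvAdj, if_pos h]
    · rw [List.foldl_cons, if_neg h, ih (acc ++ [x])]
      rw [pvAdj, if_neg h, List.getLast?_concat, List.append_assoc, List.singleton_append]

-- pvAdj on a sorted list whose elements all dominate the key: strictly increasing,
-- and keeps exactly the elements different from the key
theorem pvAdj_spec (xs : List Int) : ∀ (p : Option Int),
    xs.Pairwise (· ≤ ·) → (∀ y ∈ xs, ∀ v, p = some v → v ≤ y) →
    (pvAdj xs p).Pairwise (· < ·) ∧ (∀ y, y ∈ pvAdj xs p ↔ y ∈ xs ∧ p ≠ some y) := by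
  induction xs with
  | nil => intro p _ _; simp [pvAdj]
  | cons x xs ih =>
    intro p hs hv
    have hx : ∀ y ∈ xs, x ≤ y := (List.pairwise_cons.mp hs).1
    have hsx : xs.Pairwise (· ≤ ·) := (List.pairwise_cons.mp hs).2
    have ⟨hpw, hmem⟩ := ih (some x) hsx (by intro y hy v hv'; cases hv'; exact hx y hy)
    by_cases h : p = some x
    · subst h
      rw [pvAdj, if_pos rfl]
      refine ⟨hpw, fun y => ?_⟩
      rw [hmem y]
      simp only [List.mem_cons]
      constructor
      · rintro ⟨hy, hne⟩; exact ⟨Or.inr hy, hne⟩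
      · rintro ⟨rfl | hy, hne⟩
        · exact (hne rfl).elim
        · exact ⟨hy, hne⟩
    · rw [pvAdj, if_neg h]
      constructor
      · refine List.pairwise_cons.mpr ⟨fun z hz => ?_, hpw⟩
        have hz' := (hmem z).mp hz
        exact lt_of_le_of_ne (hx z hz'.1) (fun hc => hz'.2 (by rw [hc]))
      · intro y
        simp only [List.mem_cons, hmem y]
        constructor
        · rintro (rfl | ⟨hy, hyx⟩)
          · exact ⟨Or.inl rfl, h⟩
          · have hyx' : y ≠ x := fun hc => hyx (by rw [hc])
            refine ⟨Or.inr hy, fun hc => ?_⟩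
            have h1 : y ≤ x := hv x (List.mem_cons_self ..) y hc
            have h2 : x ≤ y := hx y hy
            exact hyx' (le_antisymm h1 h2)
        · rintro ⟨rfl | hy, hne⟩
          · exact Or.inl rfl
          · by_cases hyx : y = x
            · exact Or.inl hyx
            · exact Or.inr ⟨hy, fun hc => hyx (Option.some.inj hc).symm⟩

-- A's fold over enumerate only uses the element component
theorem pvFoldl_enumerate (l : List Int) : ∀ (s : Int) (acc : List Int),
    (PySem.List.enumerate l s).foldl (fun acc p => if p.2 ∈ acc then acc else acc ++ [p.2]) acc
      = l.foldl (fun acc n => if n ∈ acc then acc else acc ++ [n]) acc := by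
  induction l with
  | nil => intro s acc; simp [PySem.List.enumerate_nil]
  | cons x xs ih => intro s acc; rw [PySem.List.enumerate_cons]; simp only [List.foldl_cons]; exact ih _ _

-- A's membership dedup: nodup, and keeps exactly the members
theorem pvDedupA_spec (xs : List Int) : ∀ (acc : List Int), acc.Nodup →
    (xs.foldl (fun acc n => if n ∈ acc then acc else acc ++ [n]) acc).Nodup ∧
    (∀ y, y ∈ xs.foldl (fun acc n => if n ∈ acc then acc else acc ++ [n]) acc ↔ y ∈ acc ∨ y ∈ xs) := by
  induction xs with
  | nil => intro acc h; simpa using h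
  | cons x xs ih =>
    intro acc hacc
    by_cases h : x ∈ acc
    · simp only [List.foldl_cons, if_pos h]
      have ⟨h1, h2⟩ := ih acc hacc
      refine ⟨h1, fun y => ?_⟩
      rw [h2 y]
      simp only [List.mem_cons]
      constructor
      · rintro (hy | hy); exacts [Or.inl hy, Or.inr (Or.inr hy)]
      · rintro (hy | rfl | hy)
        exacts [Or.inl hy, Or.inl h, Or.inr hy]
    · simp only [List.foldl_cons, if_neg h]
      have hacc' : (acc ++ [x]).Nodup := by
        simp [List.nodup_append, hacc]
        exact fun a ha hax => h (hax ▸ ha)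
      have ⟨h1, h2⟩ := ih (acc ++ [x]) hacc'
      refine ⟨h1, fun y => ?_⟩
      rw [h2 y]
      simp only [List.mem_append, List.mem_cons]
      tauto

-- ===== VERDICT (by name: the statement is the Claim_ definition above) =====
theorem reducir_lista_spec : Claim_equal_reducir_lista := by
  intro lista _ _
  unfold Spec_reducir_lista reducir_lista reducir_lista_alt
  have hB : (PySem.List.sorted lista (fun x => x) false).foldl
      (fun acc x => if acc.getLast? = some x then acc else acc ++ [x]) []
      = pvAdj (PySem.List.sorted lista (fun x => x) false) none := by
    simpa using pvAdj_foldl (PySem.List.sorted lista (fun x => x) false) []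
  have hsorted : (PySem.List.sorted lista (fun x => x) false).Pairwise (· ≤ ·) := by
    simpa using PySem.List.sorted_pairwise lista (fun x => x)
  have ⟨hupw, humem⟩ := pvAdj_spec (PySem.List.sorted lista (fun x => x) false) none
    hsorted (by intro y _ v hv; cases hv)
  have hA := pvFoldl_enumerate lista 0 []
  have ⟨hdnd, hdmem⟩ := pvDedupA_spec lista [] List.nodup_nil
  have hund : (pvAdj (PySem.List.sorted lista (fun x => x) false) none).Nodup :=
    List.Pairwise.imp (fun h => ne_of_lt h) hupw
  have hperm : (pvAdj (PySem.List.sorted lista (fun x => x) false) none).Perm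
      (lista.foldl (fun acc n => if n ∈ acc then acc else acc ++ [n]) []) := by
    rw [List.perm_ext_iff_of_nodup hund hdnd]
    intro y
    rw [humem y, hdmem y]
    simp [PySem.List.mem_sorted]
  have hkey : PySem.List.sorted
      (lista.foldl (fun acc n => if n ∈ acc then acc else acc ++ [n]) []) (fun x => x) false
      = pvAdj (PySem.List.sorted lista (fun x => x) false) none :=
    PySem.List.sorted_eq_of_perm_of_pairwise_lt _ _ _ hperm hupw
  simp only [hA, hB, hkey]
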